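-- pv_equiv track=rewrite | github.com/yesonsys03-web/VibeLign | vibelign/commands/vib_transfer_cmd.py | _merge_handoff_lines
-- ===== SOURCE A (Python) =====
-- def _merge_handoff_lines(primary: list[str], secondary: list[str], limit: int = 8) -> list[str]:
--     merged: list[str] = []
--     for item in primary + secondary:
--         if item and item not in merged:
--             merged.append(item)
--         if len(merged) >= limit:
--             break
--     return merged
-- ===== SOURCE B (Python) =====
-- def _merge_handoff_lines(primary: list[str], secondary: list[str], limit: int = 8) -> list[str]:
--     lines = primary + secondary
--     first = {}
--     for i, item in enumerate(lines):
--         if item and item not in first: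
--             first[item] = i
--     uniq = [item for i, item in enumerate(lines) if first.get(item) == i]
--     return uniq[:max(limit, 0)]
-- ===== Notes on version B (the rewrite author's own statement) =====
-- stated objective: alternative
-- what changed: Dedup is no longer an accumulator with a membership scan of the partial output and an early break: B is staged and stateless per item - one pass records each line's first-occurrence index in a table, a second pass keeps exactly the items standing at their first-occurrence position, and a final slice applies the limit.
-- intended difference: For limit <= 0 when the first element of primary+secondary is non-empty, A still returns that one element (it checks the cap only after appending), while B returns the empty list, which honours the requested limit. — e.g. on _merge_handoff_lines(["a"], [], 0): A returns ["a"], B returns []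
import Mathlib
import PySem

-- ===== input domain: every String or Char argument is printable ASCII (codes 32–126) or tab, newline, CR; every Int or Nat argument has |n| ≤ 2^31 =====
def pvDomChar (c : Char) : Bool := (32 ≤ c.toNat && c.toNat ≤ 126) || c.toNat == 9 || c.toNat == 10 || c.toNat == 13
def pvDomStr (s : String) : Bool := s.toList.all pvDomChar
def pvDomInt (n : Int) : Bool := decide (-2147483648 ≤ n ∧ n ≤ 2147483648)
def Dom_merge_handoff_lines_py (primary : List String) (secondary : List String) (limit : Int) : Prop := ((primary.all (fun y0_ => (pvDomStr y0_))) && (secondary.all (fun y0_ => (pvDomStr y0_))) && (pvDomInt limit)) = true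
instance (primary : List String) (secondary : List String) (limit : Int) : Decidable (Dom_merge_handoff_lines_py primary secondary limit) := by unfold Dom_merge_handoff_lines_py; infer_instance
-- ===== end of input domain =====

-- B replaces A's accumulate/membership-scan/early-break loop by a stateless staged computation:
-- keep exactly the items whose enumerate position equals their first-occurrence index, then slice to the limit.


-- ===== PORT A =====
-- the 'for item in primary + secondary' loop with early break, carrying 'merged'
def mergeLoopA (limit : Int) : List String → List String → List String
  | [], merged => merged
  | item :: rest, merged =>
      let merged' := if item ≠ "" ∧ item ∉ merged then merged ++ [item] else merged
      if (merged'.length : Int) ≥ limit then merged' else mergeLoopA limit rest merged'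

def merge_handoff_lines_py (primary : List String) (secondary : List String) (limit : Int) : List String :=
  mergeLoopA limit (primary ++ secondary) []

-- ===== PORT B =====
-- pass 1: first-occurrence index table; pass 2: keep items at their first-occurrence position;
-- then uniq[:max(limit,0)] (the slice bound is nonnegative, so it is List.take — exact).
-- 'first.get(item) == i' is get? = some i (None compares unequal to an int).
def merge_handoff_lines_py_alt (primary : List String) (secondary : List String) (limit : Int) : List String :=
  let lines := primary ++ secondary
  let first := (PySem.List.enumerate lines).foldl
    (fun d p => if p.2 ≠ "" ∧ d.contains p.2 = false then d.insert p.2 p.1 else d)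
    PySem.Dict.empty
  let uniq := (PySem.List.enumerate lines).filterMap
    (fun p : Int × String => if first.get? p.2 = some p.1 then some p.2 else none)
  uniq.take (max limit 0).toNat

-- ===== PRECONDITION & SPEC =====
-- For limit ≤ 0 when the first element of primary+secondary is non-empty, A still returns that one
-- element (it checks the cap only after appending), while B returns [], which honours the limit.
def D_merge_handoff_lines_py (primary : List String) (secondary : List String) (limit : Int) : Prop :=
  limit ≤ 0 ∧ (primary ++ secondary).headD "" ≠ ""
instance (primary : List String) (secondary : List String) (limit : Int) : Decidable (D_merge_handoff_lines_py primary secondary limit) := by unfold D_merge_handoff_lines_py; infer_instance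

def Spec_merge_handoff_lines_py (primary : List String) (secondary : List String) (limit : Int) (out : List String) : Prop := ¬ D_merge_handoff_lines_py primary secondary limit → out = merge_handoff_lines_py_alt primary secondary limit
instance (primary : List String) (secondary : List String) (limit : Int) (out : List String) : Decidable (Spec_merge_handoff_lines_py primary secondary limit out) := by unfold Spec_merge_handoff_lines_py; infer_instance

def pvDiffWitness_merge_handoff_lines_py : List String × List String × Int := (["a"], [], 0)
def pvDiffWitnessOut_merge_handoff_lines_py : (List String) × (List String) := (["a"], [])

-- ===== CLAIM =====
def Claim_unchanged_merge_handoff_lines_py : Prop := ∀ (primary : List String) (secondary : List String) (limit : Int), Dom_merge_handoff_lines_py primary secondary limit → Spec_merge_handoff_lines_py primary secondary limit (merge_handoff_lines_py primary secondary limit)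
def Claim_changed_merge_handoff_lines_py : Prop := Dom_merge_handoff_lines_py (pvDiffWitness_merge_handoff_lines_py.1) (pvDiffWitness_merge_handoff_lines_py.2.1) (pvDiffWitness_merge_handoff_lines_py.2.2) ∧ D_merge_handoff_lines_py (pvDiffWitness_merge_handoff_lines_py.1) (pvDiffWitness_merge_handoff_lines_py.2.1) (pvDiffWitness_merge_handoff_lines_py.2.2) ∧ merge_handoff_lines_py (pvDiffWitness_merge_handoff_lines_py.1) (pvDiffWitness_merge_handoff_lines_py.2.1) (pvDiffWitness_merge_handoff_lines_py.2.2) = pvDiffWitnessOut_merge_handoff_lines_py.1 ∧ merge_handoff_lines_py_alt (pvDiffWitness_merge_handoff_lines_py.1) (pvDiffWitness_merge_handoff_lines_py.2.1) (pvDiffWitness_merge_handoff_lines_py.2.2) = pvDiffWitnessOut_merge_handoff_lines_py.2 ∧ pvDiffWitnessOut_merge_handoff_lines_py.1 ≠ pvDiffWitnessOut_merge_handoff_lines_py.2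
def Claim_exact_merge_handoff_lines_py : Prop := ∀ (primary : List String) (secondary : List String) (limit : Int), Dom_merge_handoff_lines_py primary secondary limit → D_merge_handoff_lines_py primary secondary limit → merge_handoff_lines_py primary secondary limit ≠ merge_handoff_lines_py_alt primary secondary limit

-- ===== LEMMAS AND PROOFS =====

-- the order-preserving dedup of the not-yet-seen truthy elements of xs, relative to 'seen'
def dedRel (seen : List String) : List String → List String
  | [] => []
  | x :: rest => if x ≠ "" ∧ x ∉ seen then x :: dedRel (seen ++ [x]) rest else dedRel seen rest

theorem index?_append_cons_self_iff (pre rest : List String) (x : String) :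
    (PySem.List.index? (pre ++ x :: rest) x = some pre.length) ↔ x ∉ pre := by
  constructor
  · intro h hx
    rcases (PySem.List.index?_eq_some_iff _ _ _).1 h with ⟨p', s', he, hlen, hnm⟩
    have : p' = pre := by
      have := List.append_inj he (by omega)
      exact this.1.symm
    exact hnm (this ▸ hx)
  · intro hx
    exact (PySem.List.index?_eq_some_iff _ _ _).2 ⟨pre, rest, rfl, rfl, hx⟩

theorem index?_append_cons_mem (pre rest : List String) (x : String) (hx : x ∈ pre) :
    ∃ k, PySem.List.index? (pre ++ x :: rest) x = some k ∧ k < pre.length := by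
  have h := PySem.List.index?_append_of_mem (x :: rest) hx
  rcases (PySem.List.index?_isSome_iff pre x).2 hx |> Option.isSome_iff_exists.1 with ⟨k, hk⟩
  refine ⟨k, by rw [h, hk], ?_⟩
  rcases (PySem.List.index?_eq_some_iff _ _ _).1 hk with ⟨p', s', he, hlen, _⟩
  have : p'.length + (x :: s').length = pre.length := by rw [he]; simp
  simp at this; omega

-- B's first-occurrence filter over a suffix equals the relative dedup
theorem filt_eq_dedRel : ∀ (suf pre seen : List String),
    (∀ x, x ∈ seen ↔ (x ≠ "" ∧ x ∈ pre)) →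
    (PySem.List.enumerate suf (pre.length : Int)).filterMap
      (fun p => if p.2 ≠ "" ∧ (PySem.List.index? (pre ++ suf) p.2).map (fun k => (k : Int)) = some p.1
                then some p.2 else none)
    = dedRel seen suf := by
  intro suf
  induction suf with
  | nil => intro pre seen _; simp [PySem.List.enumerate_nil, dedRel]
  | cons x rest ih =>
    intro pre seen hseen
    rw [PySem.List.enumerate_cons]
    have hass : pre ++ x :: rest = (pre ++ [x]) ++ rest := by simp
    have hlen1 : ((pre ++ [x]).length : Int) = (pre.length : Int) + 1 := by simp
    by_cases hx : x = ""
    · -- filter drops it; dedRel skips with unchanged seen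
      subst hx
      have hseen' : ∀ y, y ∈ seen ↔ (y ≠ "" ∧ y ∈ pre ++ [""]) := by
        intro y; rw [hseen y]
        constructor
        · rintro ⟨h1, h2⟩; exact ⟨h1, by simp [h2]⟩
        · rintro ⟨h1, h2⟩
          rcases List.mem_append.1 h2 with h | h
          · exact ⟨h1, h⟩
          · simp at h; exact absurd h h1
      have hrec := ih (pre ++ [""]) seen hseen'
      rw [hlen1, ← hass] at hrec
      rw [List.filterMap_cons_none (by simp)]
      rw [show dedRel seen ("" :: rest) = dedRel seen rest from by
        simp [dedRel]]
      exact hrec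
    · by_cases hm : x ∈ pre
      · -- first occurrence is earlier: filter drops it; x ∈ seen so dedRel skips
        rcases index?_append_cons_mem pre rest x hm with ⟨k, hk, hklt⟩
        have hxs : x ∈ seen := (hseen x).2 ⟨hx, hm⟩
        have hseen' : ∀ y, y ∈ seen ↔ (y ≠ "" ∧ y ∈ pre ++ [x]) := by
          intro y; rw [hseen y]
          constructor
          · rintro ⟨h1, h2⟩; exact ⟨h1, by simp [h2]⟩
          · rintro ⟨h1, h2⟩
            rcases List.mem_append.1 h2 with h | h
            · exact ⟨h1, h⟩
            · simp at h; subst h; exact ⟨h1, hm⟩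
        have hrec := ih (pre ++ [x]) seen hseen'
        rw [hlen1, ← hass] at hrec
        have hne : ¬ ((PySem.List.index? (pre ++ x :: rest) x).map (fun k => (k : Int)) = some ((pre.length : Int))) := by
          rw [hk]; simp; omega
        rw [List.filterMap_cons_none (by rw [if_neg (fun h => hne h.2)])]
        rw [show dedRel seen (x :: rest) = dedRel seen rest from by
          simp only [dedRel]; rw [if_neg (by simp [hxs])]]
        exact hrec
      · -- first occurrence here: filter keeps it; dedRel appends
        have hk : PySem.List.index? (pre ++ x :: rest) x = some pre.length :=
          (index?_append_cons_self_iff pre rest x).2 hm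
        have hxs : x ∉ seen := fun h => hm ((hseen x).1 h).2
        have hseen' : ∀ y, y ∈ seen ++ [x] ↔ (y ≠ "" ∧ y ∈ pre ++ [x]) := by
          intro y
          constructor
          · intro h
            rcases List.mem_append.1 h with h | h
            · rcases (hseen y).1 h with ⟨h1, h2⟩; exact ⟨h1, by simp [h2]⟩
            · simp at h; subst h; exact ⟨hx, by simp⟩
          · rintro ⟨h1, h2⟩
            rcases List.mem_append.1 h2 with h | h
            · exact List.mem_append.2 (Or.inl ((hseen y).2 ⟨h1, h⟩))
            · simp at h; subst h; simp
        have hrec := ih (pre ++ [x]) (seen ++ [x]) hseen'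
        rw [hlen1, ← hass] at hrec
        rw [List.filterMap_cons_some (f := _) (by rw [if_pos ⟨hx, by rw [hk]; rfl⟩])]
        rw [show dedRel seen (x :: rest) = x :: dedRel (seen ++ [x]) rest from by
          simp only [dedRel]; rw [if_pos ⟨hx, hxs⟩]]
        rw [hrec]

-- what the first-pass table holds: the (shifted) first-occurrence index of every truthy line
theorem first_get? : ∀ (xs : List String) (s : Int) (d : PySem.Dict String Int) (x : String),
    ((PySem.List.enumerate xs s).foldl
        (fun d p => if p.2 ≠ "" ∧ d.contains p.2 = false then d.insert p.2 p.1 else d) d).get? x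
      = if d.contains x then d.get? x
        else if x = "" then none
        else (PySem.List.index? xs x).map (fun k => s + (k : Int)) := by
  intro xs
  induction xs with
  | nil =>
    intro s d x
    rw [PySem.List.enumerate_nil]
    simp only [List.foldl_nil, PySem.List.index?_eq_idxOf?]
    by_cases hc : d.contains x
    · simp [hc]
    · have : d.get? x = none := by
        rw [PySem.Dict.get?_eq_none_iff_contains]
        simpa using hc
      simp [hc, this]
  | cons y ys ih =>
    intro s d x
    rw [PySem.List.enumerate_cons, List.foldl_cons]
    by_cases hy : y = ""
    · rw [if_neg (by simp [hy])]
      rw [ih (s + 1) d x]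
      by_cases hc : d.contains x <;> by_cases hx : x = "" <;>
        simp only [hc, hx, if_true, if_false, reduceIte]
      have hne : y ≠ x := fun h => hx (h ▸ hy)
      rw [PySem.List.index?_cons_of_ne _ hne]
      cases PySem.List.index? ys x <;> simp <;> omega
    · by_cases hcy : d.contains y
      · rw [if_neg (by simp [hcy])]
        rw [ih (s + 1) d x]
        by_cases hx : x = ""
        · simp [hx]
        · by_cases hxy : x = y
          · subst hxy; simp [hcy]
          · have hne : y ≠ x := fun h => hxy h.symm
            by_cases hc : d.contains x <;> simp only [hc, hx, if_true, if_false, reduceIte]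
            rw [PySem.List.index?_cons_of_ne _ hne]
            cases PySem.List.index? ys x <;> simp <;> omega
      · rw [if_pos ⟨hy, by simpa using hcy⟩]
        rw [ih (s + 1) (d.insert y s) x]
        by_cases hxy : x = y
        · subst hxy
          rw [if_pos (PySem.Dict.contains_insert_self d x s),
              PySem.Dict.get?_insert_self,
              if_neg (by simpa using hcy), if_neg hy,
              PySem.List.index?_cons_self]
          simp
        · have hcix : (d.insert y s).contains x = d.contains x := by
            rw [PySem.Dict.contains_insert]; simp [fun h => hxy (by exact_mod_cast h)]
            intro h; exact absurd h hxy
          rw [hcix, PySem.Dict.get?_insert_of_ne d s hxy]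
          by_cases hc : d.contains x
          · simp [hc]
          · by_cases hx : x = ""
            · simp [hc, hx]
            · simp only [hc, hx, if_false, reduceIte]
              rw [PySem.List.index?_cons_of_ne _ (fun h => hxy h.symm)]
              cases PySem.List.index? ys x <;> simp <;> omega

theorem alt_eq_take_dedRel (primary secondary : List String) (limit : Int) :
    merge_handoff_lines_py_alt primary secondary limit
      = (dedRel [] (primary ++ secondary)).take (max limit 0).toNat := by
  show ((PySem.List.enumerate (primary ++ secondary)).filterMap
      (fun p : Int × String => if ((PySem.List.enumerate (primary ++ secondary)).foldl
          (fun d p => if p.2 ≠ "" ∧ d.contains p.2 = false then d.insert p.2 p.1 else d)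
          PySem.Dict.empty).get? p.2 = some p.1 then some p.2 else none)).take (max limit 0).toNat
    = (dedRel [] (primary ++ secondary)).take (max limit 0).toNat
  have hpred : ∀ p : Int × String,
      (if ((PySem.List.enumerate (primary ++ secondary)).foldl
            (fun d p => if p.2 ≠ "" ∧ d.contains p.2 = false then d.insert p.2 p.1 else d)
            PySem.Dict.empty).get? p.2 = some p.1 then some p.2 else none)
      = (if p.2 ≠ "" ∧ (PySem.List.index? (primary ++ secondary) p.2).map (fun k => (k : Int)) = some p.1
         then some p.2 else none) := by
    intro p
    rw [first_get? (primary ++ secondary) 0 PySem.Dict.empty p.2]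
    by_cases hx : p.2 = ""
    · simp [hx, PySem.Dict.contains_empty]
    · simp only [PySem.Dict.contains_empty, if_false, hx, reduceIte, Bool.false_eq_true]
      cases PySem.List.index? (primary ++ secondary) p.2 <;> simp [hx]
  rw [List.filterMap_congr (fun p _ => hpred p)]
  have h := filt_eq_dedRel (primary ++ secondary) [] [] (by simp)
  -- [] ++ xs and (([]:List String).length : Int) reduce definitionally
  exact congrArg (fun l => List.take (max limit 0).toNat l) h

theorem mergeLoopA_eq_take (limit : Int) : ∀ (xs acc : List String),
    (acc.length : Int) < limit →
    mergeLoopA limit xs acc = acc ++ (dedRel acc xs).take (limit - acc.length).toNat := by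
  intro xs
  induction xs with
  | nil => intro acc _; simp [mergeLoopA, dedRel]
  | cons x rest ih =>
    intro acc hlt
    by_cases hc : x ≠ "" ∧ x ∉ acc
    · have hlen : ((acc ++ [x]).length : Int) = acc.length + 1 := by simp
      by_cases hstop : (acc.length : Int) + 1 ≥ limit
      · have hk : (limit - acc.length).toNat = 1 := by omega
        simp [mergeLoopA, hc, dedRel, hk, hstop]
      · have h2 : ((acc ++ [x]).length : Int) < limit := by rw [hlen]; omega
        have hk : (limit - acc.length).toNat = (limit - ((acc.length : Int) + 1)).toNat + 1 := by
          omega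
        simp only [mergeLoopA, ih _ h2, dedRel, if_pos hc, hk,
          List.take_succ_cons, hlen, List.append_assoc, List.cons_append, List.nil_append]
        rw [if_neg hstop]
    · have h1 : ¬ ((acc.length : Int) ≥ limit) := by omega
      simp only [mergeLoopA, if_neg hc, ih _ hlt, dedRel]
      rw [if_neg h1]

-- ===== VERDICT =====
theorem merge_handoff_lines_py_spec : Claim_unchanged_merge_handoff_lines_py := by
  intro primary secondary limit _ hnD
  unfold merge_handoff_lines_py
  rw [alt_eq_take_dedRel]
  by_cases hpos : 1 ≤ limit
  · have h := mergeLoopA_eq_take limit (primary ++ secondary) [] (by simp; omega)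
    have hmax : (max limit 0).toNat = (limit - ([] : List String).length).toNat := by
      simp; omega
    rw [h, hmax]; simp
  · have hlim : limit ≤ 0 := by omega
    have hmax : (max limit 0).toNat = 0 := by omega
    rw [hmax, List.take_zero]
    have hhead : (primary ++ secondary).headD "" = "" := by
      by_contra h
      exact hnD ⟨hlim, h⟩
    cases hxs : primary ++ secondary with
    | nil => simp [mergeLoopA]
    | cons x rest =>
      have hx : x = "" := by simpa [hxs] using hhead
      simp only [mergeLoopA, hx]
      simp
      omega

theorem merge_handoff_lines_py_changed : Claim_changed_merge_handoff_lines_py := by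
  unfold Claim_changed_merge_handoff_lines_py; decide

theorem merge_handoff_lines_py_tight : Claim_exact_merge_handoff_lines_py := by
  intro primary secondary limit _ hD
  obtain ⟨hlim, hhead⟩ := hD
  unfold merge_handoff_lines_py
  rw [alt_eq_take_dedRel]
  have hmax : (max limit 0).toNat = 0 := by omega
  rw [hmax, List.take_zero]
  cases hxs : primary ++ secondary with
  | nil => simp [hxs] at hhead
  | cons x rest =>
    have hx : x ≠ "" := by simpa [hxs] using hhead
    have hxm : x ∉ ([] : List String) := by simp
    have hstop : limit ≤ 1 := by omega
    simp [mergeLoopA, hx, hxm, hstop]
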